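-- pv_equiv track=rewrite | github.com/Ryannally91/zigzag | zig_zag.py | solution
-- ===== SOURCE A (Python) =====
-- def solution(number):
--     zig_zag=[] #1 =true, #0 =false
--     for i in range(len(number)):
--         if i < len(number)-2:
--             if number[i] > number[i+1] < number[i+2] or  number[i] < number[i+1] > number[i+2]:
--                 zig_zag.append(1)
--             else:
--                 zig_zag.append(0)
--         else:
--             break
--     return zig_zag
-- ===== SOURCE B (Python) =====
-- def solution(number):
--     dirs = [1 if a < b else (-1 if a > b else 0) for a, b in zip(number, number[1:])]
--     return [1 if d1 * d2 < 0 else 0 for d1, d2 in zip(dirs, dirs[1:])]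
-- ===== Notes on version B (the rewrite author's own statement) =====
-- stated objective: alternative
-- what changed: B first builds a directions list of pairwise comparison signs and then marks a triple as zigzag when adjacent directions have a negative product, replacing A's index loop with break and its triple chained comparisons.
import Mathlib
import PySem

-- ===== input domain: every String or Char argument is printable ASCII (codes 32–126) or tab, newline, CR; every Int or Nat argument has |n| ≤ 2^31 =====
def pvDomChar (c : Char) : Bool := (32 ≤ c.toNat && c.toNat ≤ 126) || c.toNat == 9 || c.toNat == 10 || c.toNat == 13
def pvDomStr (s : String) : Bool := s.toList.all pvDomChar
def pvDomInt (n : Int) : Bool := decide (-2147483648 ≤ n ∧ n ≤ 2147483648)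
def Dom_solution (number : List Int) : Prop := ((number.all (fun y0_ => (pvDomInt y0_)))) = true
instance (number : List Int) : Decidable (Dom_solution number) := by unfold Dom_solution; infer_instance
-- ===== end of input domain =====

-- B replaces A's index loop (with break and chained triple comparisons) by a two-pass
-- decomposition: a list of pairwise comparison signs, then a negative-product test on
-- adjacent signs; objective: alternative (same O(n) cost, different structure).

-- ===== PORT A =====
-- loop body: the indices i, i+1, i+2 are in range whenever the branch condition holds,
-- so pyGetD is exact here (Python's number[i] cannot raise on the taken branch)
def solutionGo (number : List Int) (idxs : List Int) (acc : List Int) : List Int :=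
  match idxs with
  | [] => acc
  | i :: rest =>
    if i < (number.length : Int) - 2 then
      solutionGo number rest (acc ++
        [if (PySem.List.pyGetD number i 0 > PySem.List.pyGetD number (i+1) 0 ∧
              PySem.List.pyGetD number (i+1) 0 < PySem.List.pyGetD number (i+2) 0) ∨
            (PySem.List.pyGetD number i 0 < PySem.List.pyGetD number (i+1) 0 ∧
              PySem.List.pyGetD number (i+1) 0 > PySem.List.pyGetD number (i+2) 0)
         then 1 else 0])
    else acc  -- break

def solution (number : List Int) : List Int :=
  solutionGo number (PySem.List.pyRange 0 number.length 1) []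

-- ===== PORT B =====
def dsign (a b : Int) : Int := if a < b then 1 else if a > b then -1 else 0

def solution_alt (number : List Int) : List Int :=
  let dirs := (number.zip (PySem.List.slice number (some 1) none)).map (fun p => dsign p.1 p.2)
  (dirs.zip (PySem.List.slice dirs (some 1) none)).map (fun p => if p.1 * p.2 < 0 then (1 : Int) else 0)

-- ===== PRECONDITION & SPEC =====
def Spec_solution (number : List Int) (out : List Int) : Prop := out = solution_alt number
instance (number : List Int) (out : List Int) : Decidable (Spec_solution number out) := by unfold Spec_solution; infer_instance

-- ===== CLAIM (what is proved, stated in full; the proofs are below) =====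
def Claim_equal_solution : Prop := ∀ (number : List Int), Dom_solution number → Spec_solution number (solution number)

-- ===== LEMMAS AND PROOFS =====

-- reference recursion: the zigzag marks, structurally
def zz : List Int → List Int
  | a :: b :: c :: rest => (if (a > b ∧ b < c) ∨ (a < b ∧ b > c) then (1 : Int) else 0) :: zz (b :: c :: rest)
  | _ => []

-- the value A's loop body appends at Nat index j
def fA (number : List Int) (j : Nat) : Int :=
  if (number.getD j 0 > number.getD (j+1) 0 ∧ number.getD (j+1) 0 < number.getD (j+2) 0) ∨
     (number.getD j 0 < number.getD (j+1) 0 ∧ number.getD (j+1) 0 > number.getD (j+2) 0)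
  then 1 else 0

lemma solutionGo_spec (number : List Int) :
    ∀ (m k : Nat) (acc : List Int),
      solutionGo number ((List.range' k m).map Int.ofNat) acc =
        acc ++ ((List.range' k m).filter (fun j => decide (j + 2 < number.length))).map (fA number) := by
  intro m
  induction m with
  | zero => intro k acc; simp [solutionGo]
  | succ m ih =>
    intro k acc
    rw [List.range'_succ]
    by_cases h : (k : Int) < (number.length : Int) - 2
    · have hk : k + 2 < number.length := by omega
      have e1 : ((k : Int) + 1) = (((k + 1 : Nat)) : Int) := by push_cast; ring
      have e2 : ((k : Int) + 2) = (((k + 2 : Nat)) : Int) := by push_cast; ring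
      show solutionGo number (Int.ofNat k :: _) acc = _
      rw [List.filter_cons]
      simp only [hk, decide_true, if_true]
      unfold solutionGo
      rw [if_pos (by exact_mod_cast h), ih]
      simp only [Int.ofNat_eq_natCast, e1, e2, PySem.List.pyGetD_natCast]
      simp [fA]
    · have hk : ¬ (k + 2 < number.length) := by omega
      show solutionGo number (Int.ofNat k :: _) acc = _
      unfold solutionGo
      rw [if_neg (by exact_mod_cast h)]
      have : ((k :: List.range' (k+1) m).filter (fun j => decide (j + 2 < number.length))) = [] := by
        rw [List.filter_eq_nil_iff]
        intro j hj
        rcases List.mem_cons.mp hj with rfl | hj'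
        · simpa using hk
        · have := (List.mem_range'_1.mp hj').1
          simp only [decide_eq_true_eq]
          omega
      rw [this]; simp

lemma solution_eq_filter (number : List Int) :
    solution number =
      ((List.range number.length).filter (fun j => decide (j + 2 < number.length))).map (fA number) := by
  unfold solution
  rw [PySem.List.pyRange_one]
  have : ((((number.length : Int)) - 0).toNat) = number.length := by omega
  rw [this, List.range_eq_range']
  simp only [zero_add]
  exact (solutionGo_spec number number.length 0 []).trans (by simp)

lemma fA_cons (a : Int) (l : List Int) (j : Nat) : fA (a :: l) (j + 1) = fA l j := by
  simp [fA]

lemma filter_eq_zz : ∀ (number : List Int),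
    ((List.range number.length).filter (fun j => decide (j + 2 < number.length))).map (fA number) = zz number := by
  intro number
  induction number with
  | nil => simp [zz]
  | cons a l ih =>
    rw [show (a :: l).length = l.length + 1 from rfl, List.range_succ_eq_map, List.filter_cons,
        List.filter_map]
    have hpred : ((fun j => decide (j + 2 < l.length + 1)) ∘ Nat.succ) = (fun j => decide (j + 2 < l.length)) := by
      funext j; simp [Function.comp]; omega
    rw [hpred]
    match l, ih with
    | [], _ => simp [zz]
    | [b], _ => simp [zz]
    | b :: c :: rest, ih =>
      rw [if_pos (show (decide (0 + 2 < (b :: c :: rest).length + 1)) = true by simp)]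
      simp only [List.map_cons, List.map_map]
      have hmap : (fA (a :: b :: c :: rest) ∘ Nat.succ) = fA (b :: c :: rest) := by
        funext j; exact fA_cons a (b :: c :: rest) j
      rw [hmap, ih]
      have hhead : fA (a :: b :: c :: rest) 0 = (if (a > b ∧ b < c) ∨ (a < b ∧ b > c) then (1 : Int) else 0) := by
        simp [fA]
      rw [hhead]
      rfl

lemma dsign_mul (a b c : Int) :
    (if dsign a b * dsign b c < 0 then (1 : Int) else 0) =
      (if (a > b ∧ b < c) ∨ (a < b ∧ b > c) then (1 : Int) else 0) := by
  unfold dsign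
  split_ifs <;> first | rfl | omega

lemma alt_cons (a b c : Int) (l : List Int) :
    solution_alt (a :: b :: c :: l) =
      (if dsign a b * dsign b c < 0 then (1 : Int) else 0) :: solution_alt (b :: c :: l) := by
  simp [solution_alt, PySem.List.slice_from_one]

lemma alt_eq_zz : ∀ (number : List Int), solution_alt number = zz number := by
  intro number
  induction number with
  | nil => simp [solution_alt, zz, PySem.List.slice_from_one]
  | cons a l ih =>
    match l, ih with
    | [], _ => simp [solution_alt, zz, PySem.List.slice_from_one]
    | [b], _ => simp [solution_alt, zz, PySem.List.slice_from_one]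
    | b :: c :: rest, ih =>
      rw [alt_cons, ih, dsign_mul]
      rfl

-- ===== VERDICT (by name: the statement is the Claim_ definition above) =====
theorem solution_spec : Claim_equal_solution := by
  intro number _
  unfold Spec_solution
  rw [solution_eq_filter, filter_eq_zz, alt_eq_zz]
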